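-- pv_equiv track=rewrite | github.com/renaldyhidayatt/Practice-python | leetcode/BitManipulation/countriplets/count.py | countTriplets
-- ===== SOURCE A (Python) =====
-- from typing import List
--
-- def countTriplets(arr: List[int]) -> int:
--     prefix, num, count, total = [0] * len(arr), 0, 0, 0
--
--     for i, v in enumerate(arr):
--         num ^= v
--         prefix[i] = num
--
--     for i in range(len(prefix) - 1):
--         for k in range(i + 1, len(prefix)):
--             total = prefix[k]
--
--             if i > 0:
--                 total ^= prefix[i - 1]
--
--             if total == 0:
--                 count += k - i
--
--     return count
-- ===== SOURCE B (Python) =====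
-- def countTriplets(arr):
--     ans, cur = 0, 0
--     seen = {0: (1, 0)}  # prefix-xor value -> (count of prefix positions, sum of those positions)
--     for k, v in enumerate(arr):
--         cur ^= v
--         c, s = seen.get(cur, (0, 0))
--         ans += c * k - s
--         seen[cur] = (c + 1, s + k + 1)
--     return ans
-- ===== Notes on version B (the rewrite author's own statement) =====
-- stated objective: faster
-- what changed: B replaces A's quadratic scan over all pairs of prefix positions by a single pass that keeps, per prefix-xor value, the count and index-sum of earlier prefix positions in a dict and adds count*k - index_sum at each step.
import Mathlib
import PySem

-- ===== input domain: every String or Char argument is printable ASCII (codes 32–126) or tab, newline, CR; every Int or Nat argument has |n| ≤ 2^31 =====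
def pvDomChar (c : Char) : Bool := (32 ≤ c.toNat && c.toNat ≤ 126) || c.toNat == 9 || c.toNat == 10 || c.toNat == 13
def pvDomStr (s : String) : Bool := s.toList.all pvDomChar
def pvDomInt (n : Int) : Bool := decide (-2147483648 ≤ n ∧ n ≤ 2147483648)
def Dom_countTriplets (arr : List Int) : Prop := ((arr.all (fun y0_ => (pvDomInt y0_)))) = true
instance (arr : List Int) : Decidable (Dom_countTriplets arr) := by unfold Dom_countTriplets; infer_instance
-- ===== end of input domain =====

-- B replaces A's quadratic scan over all prefix pairs by a single pass keeping, per prefix-xor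
-- value, the count and index-sum of the earlier prefix positions in a dict (objective: faster).

-- ===== PORT A =====
def countTriplets (arr : List Int) : Int :=
  -- prefix, num, count, total = [0] * len(arr), 0, 0, 0 ; first loop fills prefix with running xors
  let fp := (PySem.List.enumerate arr 0).foldl
    (fun (st : List Int × Int) p =>
      let num := PySem.Int.bxor st.2 p.2
      (PySem.List.pySetD st.1 p.1 num, num))
    (List.replicate arr.length (0 : Int), 0)
  let prefix_ := fp.1
  -- second, quadratic double loop
  (PySem.List.pyRange 0 (PySem.List.len prefix_ - 1) 1).foldl
    (fun count i =>
      (PySem.List.pyRange (i + 1) (PySem.List.len prefix_) 1).foldl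
        (fun count k =>
          let total := PySem.List.pyGetD prefix_ k 0
          let total := if i > 0 then PySem.Int.bxor total (PySem.List.pyGetD prefix_ (i - 1) 0) else total
          if total = 0 then count + (k - i) else count)
        count)
    0

-- ===== PORT B =====
def countTriplets_alt (arr : List Int) : Int :=
  let st := (PySem.List.enumerate arr 0).foldl
    (fun (st : Int × Int × PySem.Dict Int (Int × Int)) p =>
      let cur := PySem.Int.bxor st.2.1 p.2
      let cs := st.2.2.getD cur (0, 0)
      (st.1 + cs.1 * p.1 - cs.2, cur, st.2.2.insert cur (cs.1 + 1, cs.2 + p.1 + 1)))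
    (0, 0, PySem.Dict.ofList [((0 : Int), ((1 : Int), (0 : Int)))])
  st.1

-- ===== PRECONDITION & SPEC =====
def Spec_countTriplets (arr : List Int) (out : Int) : Prop := out = countTriplets_alt arr
instance (arr : List Int) (out : Int) : Decidable (Spec_countTriplets arr out) := by unfold Spec_countTriplets; infer_instance

-- ===== CLAIM (what is proved, stated in full; the proofs are below) =====
def Claim_equal_countTriplets : Prop := ∀ (arr : List Int), Dom_countTriplets arr → Spec_countTriplets arr (countTriplets arr)

-- ===== LEMMAS AND PROOFS =====

-- xor of two ints is zero iff they are equal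
lemma pv_bxor_zero_iff (a b : Int) : PySem.Int.bxor a b = 0 ↔ a = b := by
  unfold PySem.Int.bxor
  split_ifs with h1 h2 h2 <;>
    first
      | (rw [Int.natCast_eq_zero, Nat.xor_eq_zero_iff]; constructor <;> intro h <;> omega)
      | (constructor <;> intro h <;> omega)

-- the list of running xors starting from accumulator num
def pvXorPre (num : Int) : List Int → List Int
  | [] => []
  | v :: vs => PySem.Int.bxor num v :: pvXorPre (PySem.Int.bxor num v) vs

lemma pv_length_xorPre (xs : List Int) : ∀ num, (pvXorPre num xs).length = xs.length := by
  induction xs with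
  | nil => intro num; rfl
  | cons x xs ih => intro num; simp [pvXorPre, ih]

lemma pvXorPre_append (xs : List Int) : ∀ (num v : Int),
    pvXorPre num (xs ++ [v]) = pvXorPre num xs ++ [PySem.Int.bxor (xs.foldl PySem.Int.bxor num) v] := by
  induction xs with
  | nil => intro num v; simp [pvXorPre]
  | cons x xs ih => intro num v; simp [pvXorPre, ih]

-- the full prefix-xor sequence, with the empty prefix (xor 0) in front
def pvQ (arr : List Int) : List Int := 0 :: pvXorPre 0 arr

lemma pv_length_Q (arr : List Int) : (pvQ arr).length = arr.length + 1 := by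
  simp [pvQ, pv_length_xorPre]

-- index access shorthand
def pvG (Q : List Int) (j : Int) : Int := PySem.List.pyGetD Q j 0

-- weight of the pair (a, b) of prefix positions
def pvF (Q : List Int) (a b : Int) : Int := if pvG Q a = pvG Q b then b - 1 - a else 0

-- count / index-sum / total weight, as sums over all positions of Q
def pvC (Q : List Int) (q : Int) : Int :=
  ((PySem.List.pyRange 0 (Q.length : Int) 1).map (fun a => if pvG Q a = q then (1 : Int) else 0)).sum
def pvS (Q : List Int) (q : Int) : Int :=
  ((PySem.List.pyRange 0 (Q.length : Int) 1).map (fun a => if pvG Q a = q then a else 0)).sum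
def pvT (Q : List Int) : Int :=
  ((PySem.List.pyRange 0 (Q.length : Int) 1).map
    (fun b => ((PySem.List.pyRange 0 b 1).map (fun a => pvF Q a b)).sum)).sum

lemma pvG_append_lt (Q : List Int) (x : Int) {a : Int} (h0 : 0 ≤ a) (h1 : a < (Q.length : Int)) :
    pvG (Q ++ [x]) a = pvG Q a := by
  unfold pvG
  rw [PySem.List.pyGetD_eq_getElem _ _ h0 (by rw [List.length_append]; push_cast; omega),
      PySem.List.pyGetD_eq_getElem _ _ h0 h1]
  exact List.getElem_append_left (by omega)

lemma pvG_append_len (Q : List Int) (x : Int) : pvG (Q ++ [x]) (Q.length : Int) = x := by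
  unfold pvG
  rw [PySem.List.pyGetD_eq_getElem _ _ (by exact Int.natCast_nonneg _)
      (by rw [List.length_append, List.length_singleton]; push_cast; omega)]
  simp only [Int.toNat_natCast]
  exact List.getElem_concat_length rfl _

lemma pvG_zero (P : List Int) : pvG ((0 : Int) :: P) 0 = 0 := by
  simp [pvG, PySem.List.pyGetD_zero_cons]

lemma pvG_cons_pos (P : List Int) (j : Int) (h1 : 1 ≤ j) (h2 : j ≤ (P.length : Int)) :
    pvG ((0 : Int) :: P) j = PySem.List.pyGetD P (j - 1) 0 := by
  unfold pvG
  rw [PySem.List.pyGetD_eq_getElem _ _ (by omega) (by rw [List.length_cons]; push_cast; omega),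
      PySem.List.pyGetD_eq_getElem _ _ (by omega) (by omega)]
  have hj : j.toNat = (j - 1).toNat + 1 := by omega
  simp only [hj, List.getElem_cons_succ]

lemma pvC_append (Q : List Int) (x q : Int) :
    pvC (Q ++ [x]) q = pvC Q q + (if x = q then 1 else 0) := by
  unfold pvC
  rw [show ((Q ++ [x]).length : Int) = (Q.length : Int) + 1 by rw [List.length_append, List.length_singleton]; push_cast; ring]
  rw [PySem.List.pyRange_one_succ_right (by positivity)]
  rw [List.map_append, List.sum_append]
  congr 1
  · apply congrArg
    apply List.map_congr_left
    intro a ha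
    rw [PySem.List.mem_pyRange_one] at ha
    rw [pvG_append_lt Q x ha.1 ha.2]
  · simp [pvG_append_len]

lemma pvS_append (Q : List Int) (x q : Int) :
    pvS (Q ++ [x]) q = pvS Q q + (if x = q then (Q.length : Int) else 0) := by
  unfold pvS
  rw [show ((Q ++ [x]).length : Int) = (Q.length : Int) + 1 by rw [List.length_append, List.length_singleton]; push_cast; ring]
  rw [PySem.List.pyRange_one_succ_right (by positivity)]
  rw [List.map_append, List.sum_append]
  congr 1
  · apply congrArg
    apply List.map_congr_left
    intro a ha
    rw [PySem.List.mem_pyRange_one] at ha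
    rw [pvG_append_lt Q x ha.1 ha.2]
  · simp [pvG_append_len]

lemma pvT_append (Q : List Int) (x : Int) :
    pvT (Q ++ [x]) = pvT Q + pvC Q x * ((Q.length : Int) - 1) - pvS Q x := by
  unfold pvT
  rw [show ((Q ++ [x]).length : Int) = (Q.length : Int) + 1 by rw [List.length_append, List.length_singleton]; push_cast; ring]
  rw [PySem.List.pyRange_one_succ_right (by positivity)]
  rw [List.map_append, List.sum_append]
  have hfront : ((PySem.List.pyRange 0 (Q.length : Int) 1).map
      (fun b => ((PySem.List.pyRange 0 b 1).map (fun a => pvF (Q ++ [x]) a b)).sum)).sum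
      = ((PySem.List.pyRange 0 (Q.length : Int) 1).map
      (fun b => ((PySem.List.pyRange 0 b 1).map (fun a => pvF Q a b)).sum)).sum := by
    apply congrArg
    apply List.map_congr_left
    intro b hb
    rw [PySem.List.mem_pyRange_one] at hb
    apply congrArg
    apply List.map_congr_left
    intro a ha
    rw [PySem.List.mem_pyRange_one] at ha
    unfold pvF
    rw [pvG_append_lt Q x ha.1 (by omega), pvG_append_lt Q x hb.1 hb.2]
  have hlast : ((PySem.List.pyRange 0 (Q.length : Int) 1).map
      (fun a => pvF (Q ++ [x]) a (Q.length : Int))).sum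
      = pvC Q x * ((Q.length : Int) - 1) - pvS Q x := by
    have hpt : ((PySem.List.pyRange 0 (Q.length : Int) 1).map
        (fun a => pvF (Q ++ [x]) a (Q.length : Int)))
        = ((PySem.List.pyRange 0 (Q.length : Int) 1).map
        (fun a => (if pvG Q a = x then (1 : Int) else 0) * ((Q.length : Int) - 1)
                  + (-1) * (if pvG Q a = x then a else 0))) := by
      apply List.map_congr_left
      intro a ha
      rw [PySem.List.mem_pyRange_one] at ha
      unfold pvF
      rw [pvG_append_lt Q x ha.1 ha.2, pvG_append_len]
      split_ifs <;> ring
    rw [hpt, PySem.List.sum_map_add_int, List.sum_map_mul_right, List.sum_map_mul_left]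
    unfold pvC pvS
    ring
  rw [hfront]
  simp only [List.map_cons, List.map_nil, List.sum_cons, List.sum_nil, add_zero] at *
  rw [hlast]
  ring

-- swapping a triangular double sum over ranges
lemma pv_tri_swap (f : Int → Int → Int) : ∀ (m : Nat),
    ((PySem.List.pyRange 0 (m : Int) 1).map
      (fun b => ((PySem.List.pyRange 0 b 1).map (fun a => f a b)).sum)).sum
    = ((PySem.List.pyRange 0 (m : Int) 1).map
      (fun a => ((PySem.List.pyRange (a + 1) (m : Int) 1).map (fun b => f a b)).sum)).sum := by
  intro m
  induction m with
  | zero => simp [PySem.List.pyRange_one_eq_nil]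
  | succ m ih =>
    rw [show ((m + 1 : Nat) : Int) = (m : Int) + 1 by push_cast; ring]
    rw [PySem.List.pyRange_one_succ_right (by positivity)]
    rw [List.map_append, List.sum_append, List.map_append, List.sum_append]
    have hrhs : ((PySem.List.pyRange 0 (m : Int) 1).map
        (fun a => ((PySem.List.pyRange (a + 1) ((m : Int) + 1) 1).map (fun b => f a b)).sum))
        = ((PySem.List.pyRange 0 (m : Int) 1).map
        (fun a => ((PySem.List.pyRange (a + 1) (m : Int) 1).map (fun b => f a b)).sum + f a (m : Int))) := by
      apply List.map_congr_left
      intro a ha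
      rw [PySem.List.mem_pyRange_one] at ha
      rw [PySem.List.pyRange_one_succ_right (by omega)]
      simp
    rw [hrhs, PySem.List.sum_map_add_int, ih]
    simp [PySem.List.pyRange_one_eq_nil]

-- ========== B side ==========

-- the fold B performs (same lambda as in the port)
def pvBFold (arr : List Int) : Int × Int × PySem.Dict Int (Int × Int) :=
  (PySem.List.enumerate arr 0).foldl
    (fun (st : Int × Int × PySem.Dict Int (Int × Int)) p =>
      let cur := PySem.Int.bxor st.2.1 p.2
      let cs := st.2.2.getD cur (0, 0)
      (st.1 + cs.1 * p.1 - cs.2, cur, st.2.2.insert cur (cs.1 + 1, cs.2 + p.1 + 1)))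
    (0, 0, PySem.Dict.ofList [((0 : Int), ((1 : Int), (0 : Int)))])

lemma pvB_alt_eq_fold (arr : List Int) : countTriplets_alt arr = (pvBFold arr).1 := rfl

lemma pvC_single (v : Int) : pvC [0] v = if (0 : Int) = v then 1 else 0 := by
  simp [pvC, pvG, PySem.List.pyRange_one]
lemma pvS_single (v : Int) : pvS [0] v = 0 := by
  simp [pvS, pvG, PySem.List.pyRange_one]

lemma pvB_inv (xs : List Int) :
    (pvBFold xs).1 = pvT (pvQ xs)
    ∧ (pvBFold xs).2.1 = xs.foldl PySem.Int.bxor 0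
    ∧ ∀ v, (pvBFold xs).2.2.getD v (0, 0) = (pvC (pvQ xs) v, pvS (pvQ xs) v) := by
  induction xs using List.reverseRecOn with
  | nil =>
    refine ⟨by decide, rfl, ?_⟩
    intro v
    have h0 : pvBFold [] = (0, 0, PySem.Dict.empty.insert 0 (1, 0)) := rfl
    rw [h0]
    show (PySem.Dict.empty.insert (0:Int) ((1:Int), (0:Int))).getD v (0, 0) = _
    rw [PySem.Dict.getD_insert]
    have hQ : pvQ [] = [0] := rfl
    rw [hQ, pvC_single, pvS_single]
    by_cases hv : v = 0 <;> simp [hv, eq_comm]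
  | append_singleton ys v ih =>
    obtain ⟨ih1, ih2, ih3⟩ := ih
    have hstep : pvBFold (ys ++ [v]) =
        (let st := pvBFold ys
         let cur := PySem.Int.bxor st.2.1 v
         let cs := st.2.2.getD cur (0, 0)
         (st.1 + cs.1 * (ys.length : Int) - cs.2, cur, st.2.2.insert cur (cs.1 + 1, cs.2 + (ys.length : Int) + 1))) := by
      unfold pvBFold
      rw [PySem.List.enumerate_append, List.foldl_append]
      simp [PySem.List.enumerate_cons, PySem.List.enumerate_nil]
    set cur := PySem.Int.bxor ((pvBFold ys).2.1) v with hcur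
    have hcur' : cur = PySem.Int.bxor (ys.foldl PySem.Int.bxor 0) v := by rw [hcur, ih2]
    have hQ : pvQ (ys ++ [v]) = pvQ ys ++ [cur] := by
      unfold pvQ
      rw [pvXorPre_append, hcur']
      simp
    have hlen : ((pvQ ys).length : Int) = (ys.length : Int) + 1 := by
      rw [pv_length_Q]; push_cast; ring
    refine ⟨?_, ?_, ?_⟩
    · rw [hstep]
      show (pvBFold ys).1 + ((pvBFold ys).2.2.getD cur (0,0)).1 * (ys.length : Int)
            - ((pvBFold ys).2.2.getD cur (0,0)).2 = _
      rw [ih1, ih3, hQ, pvT_append, hlen]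
      ring
    · rw [hstep]
      show cur = (ys ++ [v]).foldl PySem.Int.bxor 0
      rw [List.foldl_append, hcur', List.foldl_cons, List.foldl_nil]
    · intro w
      rw [hstep]
      show ((pvBFold ys).2.2.insert cur (((pvBFold ys).2.2.getD cur (0,0)).1 + 1,
            ((pvBFold ys).2.2.getD cur (0,0)).2 + (ys.length : Int) + 1)).getD w (0,0) = _
      rw [PySem.Dict.getD_insert, ih3, hQ, pvC_append, pvS_append]
      by_cases hw : w = cur
      · subst hw
        rw [ih3]
        simp [Prod.ext_iff, hlen]
        omega
      · have : ¬ (cur = w) := fun h => hw h.symm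
        simp [hw, this, ih3]

-- ========== A side ==========

lemma pvSetD_append (d t : List Int) (v w : Int) :
    PySem.List.pySetD (d ++ v :: t) (d.length : Int) w = d ++ w :: t := by
  simp [PySem.List.pySetD, PySem.List.pySet?, PySem.List.pyIdx?, List.set_append]

lemma pvA_fill (xs : List Int) : ∀ (done rest : List Int) (num j : Int),
    rest.length = xs.length → j = (done.length : Int) →
    (PySem.List.enumerate xs j).foldl
      (fun (st : List Int × Int) p =>
        let num := PySem.Int.bxor st.2 p.2
        (PySem.List.pySetD st.1 p.1 num, num))
      (done ++ rest, num)
    = (done ++ pvXorPre num xs, xs.foldl PySem.Int.bxor num) := by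
  induction xs with
  | nil =>
    intro done rest num j hlen hj
    have : rest = [] := List.eq_nil_of_length_eq_zero hlen
    subst this
    simp [PySem.List.enumerate_nil, pvXorPre]
  | cons x xs ih =>
    intro done rest num j hlen hj
    rcases rest with _ | ⟨r, rest'⟩
    · simp at hlen
    rw [PySem.List.enumerate_cons, List.foldl_cons]
    subst hj
    have h1 : PySem.List.pySetD (done ++ r :: rest') ((done.length : Int)) (PySem.Int.bxor num x)
        = done ++ PySem.Int.bxor num x :: rest' := pvSetD_append done rest' r (PySem.Int.bxor num x)
    dsimp only
    rw [h1]
    rw [show done ++ PySem.Int.bxor num x :: rest' = (done ++ [PySem.Int.bxor num x]) ++ rest' by simp]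
    rw [ih (done ++ [PySem.Int.bxor num x]) rest' (PySem.Int.bxor num x) ((done.length : Int) + 1)
        (by simpa using hlen) (by rw [List.length_append, List.length_singleton]; push_cast; ring)]
    simp [pvXorPre]

-- the inner-loop body, as an additive weight
def pvW (P : List Int) (i k : Int) : Int :=
  if (if i > 0 then PySem.Int.bxor (PySem.List.pyGetD P k 0) (PySem.List.pyGetD P (i - 1) 0)
      else PySem.List.pyGetD P k 0) = 0
  then k - i else 0

lemma pvW_eq_F (P : List Int) (i k : Int) (hi0 : 0 ≤ i) (hi1 : i < (P.length : Int))
    (hk0 : 0 ≤ k) (hk1 : k < (P.length : Int)) :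
    pvW P i k = pvF ((0 : Int) :: P) i (k + 1) := by
  unfold pvW pvF
  have hGk : pvG ((0 : Int) :: P) (k + 1) = PySem.List.pyGetD P k 0 := by
    rw [pvG_cons_pos P (k + 1) (by omega) (by omega)]
    norm_num
  by_cases hi : i > 0
  · have hGi : pvG ((0 : Int) :: P) i = PySem.List.pyGetD P (i - 1) 0 :=
      pvG_cons_pos P i (by omega) (by omega)
    rw [if_pos hi]
    rw [hGk, hGi]
    apply if_congr _ (by ring) rfl
    rw [pv_bxor_zero_iff]
    exact eq_comm
  · have hieq : i = 0 := by omega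
    rw [if_neg hi, hieq]
    rw [hGk, pvG_zero]
    apply if_congr _ (by ring) rfl
    exact eq_comm
  
-- shifting a range by one
lemma pvShift (g : Int → Int) (a b : Int) :
    (PySem.List.pyRange a b 1).map (fun k => g (k + 1))
    = (PySem.List.pyRange (a + 1) (b + 1) 1).map g := by
  rw [PySem.List.pyRange_one a b, PySem.List.pyRange_one (a + 1) (b + 1)]
  rw [show (b + 1 - (a + 1)) = b - a by ring]
  rw [List.map_map, List.map_map]
  apply List.map_congr_left
  intro t _
  show g (a + (t : Int) + 1) = g (a + 1 + (t : Int))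
  congr 1
  ring

lemma pvA_eq (arr : List Int) : countTriplets arr = pvT (pvQ arr) := by
  by_cases harr : arr = []
  · subst harr; decide
  have hfill : (PySem.List.enumerate arr 0).foldl
      (fun (st : List Int × Int) p =>
        let num := PySem.Int.bxor st.2 p.2
        (PySem.List.pySetD st.1 p.1 num, num))
      (List.replicate arr.length (0 : Int), 0)
      = (pvXorPre 0 arr, arr.foldl PySem.Int.bxor 0) := by
    have := pvA_fill arr [] (List.replicate arr.length (0 : Int)) 0 0 (by simp) (by simp)
    simpa using this
  set P := pvXorPre 0 arr with hP
  set n : Int := (P.length : Int) with hn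
  have hn1 : 1 ≤ n := by
    rw [hn, hP, pv_length_xorPre]
    have : arr.length ≠ 0 := fun h => harr (List.eq_nil_of_length_eq_zero h)
    omega
  have hA : countTriplets arr
      = (PySem.List.pyRange 0 (n - 1) 1).foldl
          (fun count i =>
            (PySem.List.pyRange (i + 1) n 1).foldl
              (fun count k =>
                let total := PySem.List.pyGetD P k 0
                let total := if i > 0 then PySem.Int.bxor total (PySem.List.pyGetD P (i - 1) 0) else total
                if total = 0 then count + (k - i) else count)
              count)
          0 := by
    unfold countTriplets
    rw [hfill]
    simp only [PySem.List.len_eq, ← hn]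
  rw [hA]
  -- turn the double fold into a double sum of weights
  have hinner : ∀ i : Int,
      (fun (count k : Int) =>
        let total := PySem.List.pyGetD P k 0
        let total := if i > 0 then PySem.Int.bxor total (PySem.List.pyGetD P (i - 1) 0) else total
        if total = 0 then count + (k - i) else count)
      = fun count k => count + pvW P i k := by
    intro i
    funext c k
    simp only [pvW]
    split_ifs <;> ring
  have houter :
      (fun (count i : Int) =>
        (PySem.List.pyRange (i + 1) n 1).foldl
          (fun count k =>
            let total := PySem.List.pyGetD P k 0
            let total := if i > 0 then PySem.Int.bxor total (PySem.List.pyGetD P (i - 1) 0) else total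
            if total = 0 then count + (k - i) else count)
          count)
      = fun count i => count + ((PySem.List.pyRange (i + 1) n 1).map (pvW P i)).sum := by
    funext c i
    rw [hinner i, PySem.List.foldl_add]
  rw [houter, PySem.List.foldl_add, zero_add]
  -- rewrite each summand in terms of pvF over Q := 0 :: P
  have hterm : ∀ i : Int, 0 ≤ i → i < n - 1 →
      ((PySem.List.pyRange (i + 1) n 1).map (pvW P i)).sum
      = ((PySem.List.pyRange (i + 1) (n + 1) 1).map (fun b => pvF ((0 : Int) :: P) i b)).sum := by
    intro i hi0 hi1
    have hstep1 : (PySem.List.pyRange (i + 1) n 1).map (pvW P i)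
        = (PySem.List.pyRange (i + 1) n 1).map (fun k => pvF ((0 : Int) :: P) i (k + 1)) := by
      apply List.map_congr_left
      intro k hk
      rw [PySem.List.mem_pyRange_one] at hk
      exact pvW_eq_F P i k hi0 (by omega) (by omega) (by omega)
    rw [hstep1, pvShift (fun b => pvF ((0 : Int) :: P) i b) (i + 1) n]
    rw [PySem.List.pyRange_one_cons (show i + 1 < n + 1 by omega)]
    rw [List.map_cons, List.sum_cons]
    have h0 : pvF ((0 : Int) :: P) i (i + 1) = 0 := by
      unfold pvF
      split_ifs <;> ring
    rw [show i + 1 + 1 = i + 2 by ring] at *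
    rw [h0, zero_add]
  have hsum1 : ((PySem.List.pyRange 0 (n - 1) 1).map
        (fun i => ((PySem.List.pyRange (i + 1) n 1).map (pvW P i)).sum)).sum
      = ((PySem.List.pyRange 0 (n - 1) 1).map
        (fun i => ((PySem.List.pyRange (i + 1) (n + 1) 1).map (fun b => pvF ((0 : Int) :: P) i b)).sum)).sum := by
    apply congrArg
    apply List.map_congr_left
    intro i hi
    rw [PySem.List.mem_pyRange_one] at hi
    exact hterm i hi.1 hi.2
  rw [hsum1]
  -- extend the outer range from [0, n-1) to [0, n+1): the two extra terms vanish
  have hext : ((PySem.List.pyRange 0 (n + 1) 1).map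
        (fun i => ((PySem.List.pyRange (i + 1) (n + 1) 1).map (fun b => pvF ((0 : Int) :: P) i b)).sum)).sum
      = ((PySem.List.pyRange 0 (n - 1) 1).map
        (fun i => ((PySem.List.pyRange (i + 1) (n + 1) 1).map (fun b => pvF ((0 : Int) :: P) i b)).sum)).sum := by
    rw [PySem.List.pyRange_one_append 0 (n - 1) (n + 1) (by omega) (by omega)]
    rw [List.map_append, List.sum_append]
    have htail : PySem.List.pyRange (n - 1) (n + 1) 1 = [n - 1, n] := by
      rw [PySem.List.pyRange_one_cons (by omega), show n - 1 + 1 = n by ring,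
          PySem.List.pyRange_one_cons (by omega), PySem.List.pyRange_one_eq_nil (by omega)]
    rw [htail]
    have ht1 : ((PySem.List.pyRange (n - 1 + 1) (n + 1) 1).map (fun b => pvF ((0 : Int) :: P) (n - 1) b)).sum = 0 := by
      rw [show n - 1 + 1 = n by ring, PySem.List.pyRange_one_cons (by omega),
          PySem.List.pyRange_one_eq_nil (by omega)]
      simp only [List.map_cons, List.map_nil, List.sum_cons, List.sum_nil, add_zero]
      unfold pvF
      split_ifs <;> ring
    have ht2 : ((PySem.List.pyRange (n + 1) (n + 1) 1).map (fun b => pvF ((0 : Int) :: P) n b)).sum = 0 := by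
      rw [PySem.List.pyRange_one_eq_nil (by omega)]
      simp
    simp only [List.map_cons, List.map_nil, List.sum_cons, List.sum_nil]
    rw [ht1, ht2]
    ring
  rw [← hext]
  -- swap the order of summation and recognise pvT
  have hm : ((P.length + 1 : Nat) : Int) = n + 1 := by push_cast; rw [hn]
  have hswap := pv_tri_swap (fun a b => pvF ((0 : Int) :: P) a b) (P.length + 1)
  rw [hm] at hswap
  rw [← hswap]
  try rw [show pvQ arr = (0 : Int) :: P by rw [hP]; rfl]
  try unfold pvT
  try rw [show (((0 : Int) :: P).length : Int) = n + 1 by rw [List.length_cons]; push_cast; rw [hn]]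

lemma pvB_eq (arr : List Int) : countTriplets_alt arr = pvT (pvQ arr) := by
  rw [pvB_alt_eq_fold]
  exact (pvB_inv arr).1

-- ===== VERDICT (by name: the statement is the Claim_ definition above) =====
theorem countTriplets_spec : Claim_equal_countTriplets := by
  intro arr _
  unfold Spec_countTriplets
  rw [pvA_eq, pvB_eq]
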